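-- pv_equiv track=rewrite | github.com/plaidbait91/DeaddictPy | data.py | listToXY
-- ===== SOURCE A (Python) =====
-- def listToXY(series):
--     # start = series[0] // 60000
--     start = 0
--     s_dict = dict()
--
--     for t in series:
--         t_val = t // 60000 - start
--         s_dict[t_val] = s_dict.get(t_val, 0) + 1
--
--
--     x = list(s_dict.keys())
--     x.sort()
--     f = {i: s_dict[i] for i in x}
--     y = list(f.values())
--
--     return (f, x, y)
-- ===== SOURCE B (Python) =====
-- def listToXY(series):
--     srt = sorted(t // 60000 for t in series)
--     x, y = [], []
--     for k in srt:
--         if x and x[-1] == k: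
--             y[-1] += 1
--         else:
--             x.append(k)
--             y.append(1)
--     return (dict(zip(x, y)), x, y)
-- ===== Notes on version B (the rewrite author's own statement) =====
-- stated objective: alternative
-- what changed: Replaces the dict-count-then-sort-keys strategy with sort-the-bucket-keys-then-run-length-scan: B sorts the mapped keys once and counts consecutive runs in a single linear pass, building x and y directly and zipping them into f.
import Mathlib
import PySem

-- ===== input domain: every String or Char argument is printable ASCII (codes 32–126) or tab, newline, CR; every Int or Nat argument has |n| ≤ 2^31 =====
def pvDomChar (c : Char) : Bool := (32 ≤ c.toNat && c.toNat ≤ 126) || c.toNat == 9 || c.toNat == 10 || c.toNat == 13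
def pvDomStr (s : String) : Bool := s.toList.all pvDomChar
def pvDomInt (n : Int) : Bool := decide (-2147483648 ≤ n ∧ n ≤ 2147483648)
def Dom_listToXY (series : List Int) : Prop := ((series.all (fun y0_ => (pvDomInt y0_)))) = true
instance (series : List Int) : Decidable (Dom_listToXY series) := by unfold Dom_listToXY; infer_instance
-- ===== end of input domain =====

-- B replaces A's dict-count-then-sort-keys strategy by sorting the bucket keys once and
-- run-length-scanning consecutive runs in a single linear pass (objective: alternative).


-- ===== PORT A =====
-- literal port of A; `f = {i: s_dict[i] for i in x}` is the fold of inserts below: every i ∈ x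
-- is a key of s_dict, so the Python lookup s_dict[i] never raises and equals `s_dict.getD i 0`.
def listToXY (series : List Int) : (List (Int × Int)) × List Int × List Int :=
  let start : Int := 0
  let s_dict : PySem.Dict Int Int := series.foldl (fun d t =>
      let t_val := PySem.Int.floordiv t 60000 - start
      d.insert t_val (d.getD t_val 0 + 1)) PySem.Dict.empty
  let x := PySem.List.sorted s_dict.keys (fun i => i)
  let f := x.foldl (fun f i => f.insert i (s_dict.getD i 0)) PySem.Dict.empty
  let y := f.values
  (f.items, x, y)

-- ===== PORT B =====
-- one step of B's run-length scan: `if x and x[-1] == k: y[-1] += 1 else: append k, 1`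
-- (`x and x[-1] == k` is exactly `x.getLast? = some k`)
def rleStep (p : List Int × List Int) (k : Int) : List Int × List Int :=
  if p.1.getLast? = some k then (p.1, p.2.dropLast ++ [p.2.getLast! + 1])
  else (p.1 ++ [k], p.2 ++ [1])

def listToXY_alt (series : List Int) : (List (Int × Int)) × List Int × List Int :=
  let srt := PySem.List.sorted (series.map (fun t => PySem.Int.floordiv t 60000)) (fun k => k)
  let xy := srt.foldl rleStep ([], [])
  (xy.1.zip xy.2, xy.1, xy.2)

-- ===== PRECONDITION & SPEC =====
def Spec_listToXY (series : List Int) (out : (List (Int × Int)) × List Int × List Int) : Prop := out = listToXY_alt series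
instance (series : List Int) (out : (List (Int × Int)) × List Int × List Int) : Decidable (Spec_listToXY series out) := by unfold Spec_listToXY; infer_instance

-- ===== CLAIM (what is proved, stated in full; the proofs are below) =====
def Claim_equal_listToXY : Prop := ∀ (series : List Int), Dom_listToXY series → Spec_listToXY series (listToXY series)

-- ===== LEMMAS AND PROOFS =====

-- the run-length groups of `k :: l` when the scan is at key k with count c
def rleGo : Int → Int → List Int → List (Int × Int)
  | k, c, [] => [(k, c)]
  | k, c, a :: t => if a = k then rleGo k (c + 1) t else (k, c) :: rleGo a 1 t

theorem foldl_rleStep (l : List Int) : ∀ (x0 y0 : List Int) (k c : Int),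
    l.foldl rleStep (x0 ++ [k], y0 ++ [c])
      = (x0 ++ (rleGo k c l).map (·.1), y0 ++ (rleGo k c l).map (·.2)) := by
  induction l with
  | nil => intro x0 y0 k c; simp [rleGo]
  | cons a t ih =>
    intro x0 y0 k c
    simp only [List.foldl_cons, rleGo]
    by_cases hak : a = k
    · subst hak
      have hstep : rleStep (x0 ++ [a], y0 ++ [c]) a = (x0 ++ [a], y0 ++ [c + 1]) := by
        simp [rleStep]
      rw [hstep, ih x0 y0 a (c + 1)]
      simp
    · have hstep : rleStep (x0 ++ [k], y0 ++ [c]) a = ((x0 ++ [k]) ++ [a], (y0 ++ [c]) ++ [1]) := by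
        simp [rleStep, Ne.symm hak]
      rw [hstep, ih (x0 ++ [k]) (y0 ++ [c]) a 1]
      simp [hak]

theorem rleGo_sorted (l : List Int) : ∀ (k c : Int), (k :: l).Pairwise (· ≤ ·) →
    rleGo k c l = (PySem.List.dedup (k :: l)).map
      (fun v => (v, if v = k then c + (l.count k : Int) else (l.count v : Int))) := by
  induction l with
  | nil =>
    intro k c _
    simp [rleGo, PySem.List.dedup, PySem.Set.ofList_cons, PySem.Set.discard]
  | cons a t ih =>
    intro k c h
    by_cases hak : a = k
    · subst hak
      have h' : (a :: t).Pairwise (· ≤ ·) := by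
        have hs : (a :: t).Sublist (a :: a :: t) := by
          exact List.Sublist.cons₂ a (List.sublist_cons_self a t)
        exact h.sublist hs
      have hded : PySem.List.dedup (a :: a :: t) = PySem.List.dedup (a :: t) := by
        simp only [PySem.List.dedup, PySem.Set.ofList_cons, PySem.Set.discard,
          List.filter_cons, List.filter_filter]
        simp
      rw [show rleGo a c (a :: t) = rleGo a (c + 1) t by simp [rleGo], ih a (c + 1) h', hded]
      apply List.map_congr_left
      intro v _
      by_cases hv : v = a
      · subst hv; simp; omega
      · simp [hv, Ne.symm hv]
    · have hk_lt : ∀ b ∈ a :: t, k < b := by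
        have hka : k ≤ a := (List.pairwise_cons.mp h).1 a (by simp)
        have hka' : k < a := lt_of_le_of_ne hka (fun he => hak he.symm)
        intro b hb
        rcases List.mem_cons.mp hb with rfl | hb'
        · exact hka'
        · exact lt_of_lt_of_le hka'
            ((List.pairwise_cons.mp (List.pairwise_cons.mp h).2).1 b hb')
      have hknot : k ∉ a :: t := fun hmem => lt_irrefl k (hk_lt k hmem)
      have h' : (a :: t).Pairwise (· ≤ ·) := (List.pairwise_cons.mp h).2
      have hded : PySem.List.dedup (k :: a :: t) = k :: PySem.List.dedup (a :: t) := by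
        simp only [PySem.List.dedup, PySem.Set.ofList_cons (x := k), PySem.Set.discard]
        congr 1
        apply List.filter_eq_self.mpr
        intro b hb
        have : b ∈ a :: t := (PySem.Set.mem_ofList _ _).mp hb
        have := hk_lt b this
        simp; omega
      rw [show rleGo k c (a :: t) = (k, c) :: rleGo a 1 t by simp [rleGo, hak], ih a 1 h', hded]
      have hcnt : (a :: t).count k = 0 := List.count_eq_zero.mpr hknot
      simp only [List.map_cons]
      congr 1
      · simp [hcnt]
      · apply List.map_congr_left
        intro v hv
        have hvmem : v ∈ a :: t := (PySem.Set.mem_ofList _ _).mp hv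
        have hvk : v ≠ k := fun he => hknot (he ▸ hvmem)
        by_cases hva : v = a
        · subst hva; simp [hvk]; omega
        · simp [hvk, hva, Ne.symm hva]

-- PySem.Set.ofList xs is a sublist of xs (first occurrences in order)
theorem ofList_sublist (xs : List Int) : (PySem.Set.ofList xs).Sublist xs := by
  induction xs with
  | nil => simp [PySem.Set.ofList]
  | cons x t ih =>
    rw [PySem.Set.ofList_cons]
    exact List.Sublist.cons₂ x (List.Sublist.trans List.filter_sublist ih)

theorem dedup_pairwise_lt (xs : List Int) (h : xs.Pairwise (· ≤ ·)) :
    (PySem.List.dedup xs).Pairwise (· < ·) := by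
  have h1 : (PySem.List.dedup xs).Pairwise (· ≤ ·) := h.sublist (ofList_sublist xs)
  have h2 : (PySem.List.dedup xs).Nodup := PySem.Set.nodup_ofList xs
  have := h1.and h2
  exact this.imp (fun {a b} ⟨hle, hne⟩ => lt_of_le_of_ne hle hne)

theorem zip_self_map (D : List Int) (g : Int → Int) :
    D.zip (D.map g) = D.map (fun v => (v, g v)) := by
  induction D with
  | nil => rfl
  | cons d t ih => simp [ih]

-- ===== VERDICT (by name: the statement is the Claim_ definition above) =====
theorem listToXY_spec : Claim_equal_listToXY := by
  unfold Claim_equal_listToXY Spec_listToXY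
  intro series _
  set key : Int → Int := fun t => PySem.Int.floordiv t 60000 with hkey
  set m : List Int := series.map key with hm
  -- A side
  have hdict : series.foldl (fun d t =>
      let t_val := PySem.Int.floordiv t 60000 - 0
      d.insert t_val (d.getD t_val 0 + 1)) PySem.Dict.empty = PySem.Dict.counter m := by
    rw [← PySem.Dict.foldl_insert_getD_add_one_eq_counter, hm, List.foldl_map]
    simp [hkey]
  set X := PySem.List.sorted (PySem.Set.ofList m) (fun i => i) with hX
  have hXnodup : X.Nodup :=
    ((PySem.List.sorted_perm _ _ _).nodup_iff).mpr (PySem.Set.nodup_ofList m)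
  have hA : listToXY series =
      (X.map (fun i => (i, (m.count i : Int))), X, X.map (fun i => (m.count i : Int))) := by
    simp only [listToXY, hdict, PySem.Dict.keys_counter, ← hX]
    have hfresh := PySem.Dict.items_foldl_insert_fresh X (fun i => i)
        (fun i => (PySem.Dict.counter m).getD i 0) PySem.Dict.empty
        (by intro a _; simp) (by simpa using hXnodup)
    have hitems : (X.foldl (fun f i => f.insert i ((PySem.Dict.counter m).getD i 0))
        PySem.Dict.empty).items = X.map (fun i => (i, (m.count i : Int))) := by
      rw [hfresh]
      simp [PySem.Dict.getD_counter, PySem.Dict.empty]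
    refine Prod.ext ?_ (Prod.ext rfl ?_)
    · simpa using hitems
    · simp only [PySem.Dict.values, hitems]
      simp
  -- B side
  rw [hA]
  simp only [listToXY_alt, ← hkey, ← hm]
  cases hsrt : PySem.List.sorted m (fun k => k) with
  | nil =>
    have hmnil : m = [] := (PySem.List.sorted_eq_nil_iff _ _ _).mp hsrt
    have hXnil : X = [] := by
      rw [hX, hmnil]
      exact (PySem.List.sorted_eq_nil_iff _ _ _).mpr rfl
    rw [hXnil]
    simp
  | cons k l =>
    have hpw : (k :: l).Pairwise (· ≤ ·) := by
      have := PySem.List.sorted_pairwise m (fun k => k)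
      rwa [hsrt] at this
    have hperm : (k :: l).Perm m := by
      have := PySem.List.sorted_perm m (fun k => k) false
      rwa [hsrt] at this
    set D := PySem.List.dedup (k :: l) with hD
    have hfold0 : (k :: l).foldl rleStep ([], []) =
        ((rleGo k 1 l).map (·.1), (rleGo k 1 l).map (·.2)) := by
      have hstep : rleStep ([], []) k = (([] : List Int) ++ [k], ([] : List Int) ++ [1]) := by
        simp [rleStep]
      rw [List.foldl_cons, hstep, foldl_rleStep l [] [] k 1]
      simp
    have hgo : rleGo k 1 l = D.map (fun v => (v, (m.count v : Int))) := by
      rw [rleGo_sorted l k 1 hpw, ← hD]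
      apply List.map_congr_left
      intro v _
      have hc : (k :: l).count v = m.count v := hperm.count_eq v
      by_cases hvk : v = k
      · subst hvk
        simp only [← hc, List.count_cons_self]
        push_cast
        ring_nf
      · rw [if_neg hvk, ← hc, List.count_cons]
        simp [Ne.symm hvk]
    have hXD : X = D := by
      rw [hX]
      apply PySem.List.sorted_eq_of_perm_of_pairwise_lt
      · refine (List.perm_ext_iff_of_nodup (PySem.Set.nodup_ofList _) (PySem.Set.nodup_ofList m)).mpr ?_
        intro v
        rw [PySem.Set.mem_ofList, PySem.Set.mem_ofList]
        exact hperm.mem_iff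
      · exact dedup_pairwise_lt _ hpw
    rw [hfold0, hgo, hXD]
    refine Prod.ext ?_ (Prod.ext ?_ ?_)
    · simp [Function.comp_def, zip_self_map]
    · simp [Function.comp_def]
    · simp [Function.comp_def]
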